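-- pv_equiv track=rewrite | github.com/Build-for-fun/AI-Internal-Manager | src/agents/team_analysis/agent.py | _format_analytics_context
-- ===== SOURCE A (Python) =====
-- from typing import Any
--
-- def _format_analytics_context(context: dict[str, Any]) -> str:
--     """Format analytics context for prompt."""
--     if not context:
--         return "No cached analytics context available. Will fetch live data."
--
--     parts = []
--
--     if context.get("decisions"):
--         decisions = context["decisions"][:3]
--         parts.append("Recent Decisions:\n" + "\n".join(
--             f"- {d.get('decision', '')[:100]}" for d in decisions
--         ))
--
--     if context.get("norms"):
--         norms = context["norms"][:3]
--         parts.append("Team Norms:\n" + "\n".join(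
--             f"- {n.get('text', '')[:100]}" for n in norms
--         ))
--
--     return "\n\n".join(parts) if parts else "No cached context."
-- ===== SOURCE B (Python) =====
-- def _format_analytics_context(context):
--     """Format analytics context for prompt (recursive string accumulation, no lists/joins)."""
--     if not context:
--         return "No cached analytics context available. Will fetch live data."
--     return _emit(context,
--                  [("decisions", "Recent Decisions:", "decision"),
--                   ("norms", "Team Norms:", "text")],
--                  "")
--
--
-- def _emit(context, sections, acc):
--     if not sections:
--         return acc if acc else "No cached context."
--     key, header, field = sections[0]
--     if context.get(key):
--         block = header + _lines(context[key][:3], field)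
--         acc = acc + "\n\n" + block if acc else block
--     return _emit(context, sections[1:], acc)
--
--
-- def _lines(items, field):
--     if not items:
--         return ""
--     return "\n- " + items[0].get(field, "")[:100] + _lines(items[1:], field)
-- ===== Notes on version B (the rewrite author's own statement) =====
-- stated objective: alternative
-- what changed: Replaced A's list-of-parts plus two join() calls by direct recursive string accumulation: a recursive _emit threads the output string through the section specs and a recursive _lines appends one '\n- ...' line per item, so no intermediate lists or joins are built.
import Mathlib
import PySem

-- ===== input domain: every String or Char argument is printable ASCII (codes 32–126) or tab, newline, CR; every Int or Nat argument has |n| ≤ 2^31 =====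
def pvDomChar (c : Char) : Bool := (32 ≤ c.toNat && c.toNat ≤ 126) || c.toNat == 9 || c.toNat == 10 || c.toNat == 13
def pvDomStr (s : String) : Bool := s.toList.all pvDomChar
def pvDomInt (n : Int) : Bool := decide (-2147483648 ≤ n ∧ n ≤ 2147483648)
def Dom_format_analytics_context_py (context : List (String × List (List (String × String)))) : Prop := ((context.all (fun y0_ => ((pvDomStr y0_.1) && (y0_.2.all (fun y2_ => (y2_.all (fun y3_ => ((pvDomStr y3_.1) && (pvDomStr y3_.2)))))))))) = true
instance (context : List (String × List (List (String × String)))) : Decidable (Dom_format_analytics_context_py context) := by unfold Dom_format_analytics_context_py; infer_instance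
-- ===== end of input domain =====

-- B replaces A's per-section list-building and "\n".join/"\n\n".join by direct recursive
-- string accumulation over the sections and items (objective: alternative); return values identical.


-- ===== PORT A =====
def format_analytics_context_py (context : List (String × List (List (String × String)))) : String :=
  if context = [] then "No cached analytics context available. Will fetch live data."
  else
    let ctx := PySem.Dict.mk context
    let parts : List String := []
    -- if context.get("decisions"):
    let parts :=
      if ctx.getD "decisions" [] ≠ [] then
        let decisions := PySem.List.slice (ctx.getD "decisions" []) none (some 3)
        parts ++ ["Recent Decisions:\n" ++ PySem.Str.join "\n"
          (decisions.map (fun d => "- " ++ PySem.Str.slice ((PySem.Dict.mk d).getD "decision" "") none (some 100)))]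
      else parts
    -- if context.get("norms"):
    let parts :=
      if ctx.getD "norms" [] ≠ [] then
        let norms := PySem.List.slice (ctx.getD "norms" []) none (some 3)
        parts ++ ["Team Norms:\n" ++ PySem.Str.join "\n"
          (norms.map (fun n => "- " ++ PySem.Str.slice ((PySem.Dict.mk n).getD "text" "") none (some 100)))]
      else parts
    if parts ≠ [] then PySem.Str.join "\n\n" parts else "No cached context."

-- ===== PORT B =====
-- helper _lines: recursive line builder, one "\n- <field[:100]>" per item
def pvLinesB (items : List (List (String × String))) (field : String) : String :=
  match items with
  | [] => ""
  | it :: rest =>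
    "\n- " ++ PySem.Str.slice ((PySem.Dict.mk it).getD field "") none (some 100) ++ pvLinesB rest field

-- helper _emit: recursion over the section specs, threading the accumulated string
def pvEmitB (ctx : PySem.Dict String (List (List (String × String))))
    (sections : List (String × String × String)) (acc : String) : String :=
  match sections with
  | [] => if acc ≠ "" then acc else "No cached context."
  | (key, header, field) :: rest =>
    let acc :=
      if ctx.getD key [] ≠ [] then
        let block := header ++ pvLinesB (PySem.List.slice (ctx.getD key []) none (some 3)) field
        if acc ≠ "" then acc ++ "\n\n" ++ block else block
      else acc
    pvEmitB ctx rest acc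

def format_analytics_context_py_alt (context : List (String × List (List (String × String)))) : String :=
  if context = [] then "No cached analytics context available. Will fetch live data."
  else
    pvEmitB (PySem.Dict.mk context)
      [("decisions", "Recent Decisions:", "decision"), ("norms", "Team Norms:", "text")] ""

-- ===== PRECONDITION & SPEC =====
def Spec_format_analytics_context_py (context : List (String × List (List (String × String)))) (out : String) : Prop := out = format_analytics_context_py_alt context
instance (context : List (String × List (List (String × String)))) (out : String) : Decidable (Spec_format_analytics_context_py context out) := by unfold Spec_format_analytics_context_py; infer_instance

-- ===== CLAIM (what is proved, stated in full; the proofs are below) =====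
def Claim_equal_format_analytics_context_py : Prop := ∀ (context : List (String × List (List (String × String)))), Dom_format_analytics_context_py context → Spec_format_analytics_context_py context (format_analytics_context_py context)

-- ===== LEMMAS AND PROOFS =====

-- "\n".join of the per-item lines, with a leading "\n", equals B's recursive line builder (nonempty item list)
theorem pv_join_lines (field : String) :
    ∀ (items : List (List (String × String))), items ≠ [] →
      "\n" ++ PySem.Str.join "\n"
        (items.map (fun d => "- " ++ PySem.Str.slice ((PySem.Dict.mk d).getD field "") none (some 100)))
      = pvLinesB items field := by
  intro items
  induction items with
  | nil => intro h; exact absurd rfl h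
  | cons x xs ih =>
    intro _
    cases xs with
    | nil => rw [String.ext_iff]; simp [PySem.Str.toList_join, PySem.Chars.join_singleton, pvLinesB, PySem.Str.slice]
    | cons y ys =>
      have h2 := ih (by simp)
      rw [String.ext_iff] at h2 ⊢
      simp [PySem.Str.toList_join, PySem.Chars.join_cons_cons, pvLinesB, PySem.Str.slice] at h2 ⊢
      simp [h2]

theorem pv_append_ne (a b : String) (ha : a ≠ "") : a ++ b ≠ "" := by
  intro e; simp at e; exact ha e.1

theorem pv_join_one (x : String) : PySem.Str.join "\n\n" [x] = x := by
  rw [String.ext_iff]; simp [PySem.Str.toList_join, PySem.Chars.join_singleton]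

theorem pv_join_two (a b : String) : PySem.Str.join "\n\n" [a, b] = a ++ "\n\n" ++ b := by
  rw [String.ext_iff]; simp [PySem.Str.toList_join, PySem.Chars.join_cons_cons, PySem.Chars.join_singleton]

theorem pv_slice3 (d : List (List (String × String))) : PySem.List.slice d none (some 3) = d.take 3 := by
  simp [pysem]

theorem pv_take3_ne (d : List (List (String × String))) (h : d ≠ []) : d.take 3 ≠ [] := by
  cases d with | nil => exact absurd rfl h | cons a l => simp

-- one section block: A's "Header:\n" ++ join form equals B's Header ++ pvLinesB form
theorem pv_block (header : String) (field : String) (d : List (List (String × String))) (hd : d ≠ []) :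
    (header ++ "\n") ++ PySem.Str.join "\n"
      ((PySem.List.slice d none (some 3)).map
        (fun x => "- " ++ PySem.Str.slice ((PySem.Dict.mk x).getD field "") none (some 100)))
    = header ++ pvLinesB (PySem.List.slice d none (some 3)) field := by
  rw [String.append_assoc, pv_join_lines field _ (by rw [pv_slice3]; exact pv_take3_ne d hd)]

-- ===== VERDICT (by name: the statement is the Claim_ definition above) =====
theorem format_analytics_context_py_spec : Claim_equal_format_analytics_context_py := by
  intro context _
  unfold Spec_format_analytics_context_py format_analytics_context_py format_analytics_context_py_alt
  by_cases hc : context = []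
  · simp [hc]
  · simp only [if_neg hc]
    by_cases hd : (PySem.Dict.mk context).getD "decisions" [] = [] <;>
      by_cases hn : (PySem.Dict.mk context).getD "norms" [] = []
    · simp [pvEmitB, hd, hn]
    · -- norms only
      have hne : ("Team Norms:" : String) ≠ "" := by decide
      have hb := pv_append_ne "Team Norms:" (pvLinesB (PySem.List.slice ((PySem.Dict.mk context).getD "norms" []) none (some 3)) "text") hne
      simp [pvEmitB, hd, hn, pv_join_one, hb]
      rw [← pv_block "Team Norms:" "text" _ hn]
      rfl
    · -- decisions only
      have hne : ("Recent Decisions:" : String) ≠ "" := by decide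
      have hb := pv_append_ne "Recent Decisions:" (pvLinesB (PySem.List.slice ((PySem.Dict.mk context).getD "decisions" []) none (some 3)) "decision") hne
      simp [pvEmitB, hd, hn, pv_join_one, hb]
      rw [← pv_block "Recent Decisions:" "decision" _ hd]
      rfl
    · -- both
      have hne : ("Recent Decisions:" : String) ≠ "" := by decide
      have hb1 := pv_append_ne "Recent Decisions:" (pvLinesB (PySem.List.slice ((PySem.Dict.mk context).getD "decisions" []) none (some 3)) "decision") hne
      have hb2 : (("Recent Decisions:" : String) ++ pvLinesB (PySem.List.slice ((PySem.Dict.mk context).getD "decisions" []) none (some 3)) "decision") ++ "\n\n" ++ ("Team Norms:" ++ pvLinesB (PySem.List.slice ((PySem.Dict.mk context).getD "norms" []) none (some 3)) "text") ≠ "" := by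
        rw [String.append_assoc]; exact pv_append_ne _ _ hb1
      simp [pvEmitB, hd, hn, pv_join_two, hb1, hb2]
      rw [← pv_block "Recent Decisions:" "decision" _ hd, ← pv_block "Team Norms:" "text" _ hn]
      rfl
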